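-- pv_equiv track=rewrite | github.com/OlegPhenomenon/hdc-brain | hdc-brain-v14.1/prep_quality_v3.py | extract_first_pair
-- ===== SOURCE A (Python) =====
-- def extract_first_pair(convs):
--     """Extract first user->assistant pair from a conversation list."""
--     q, a = "", ""
--     for msg in convs:
--         role = msg.get("from", msg.get("role", ""))
--         text = msg.get("value", msg.get("content", ""))
--         if role in ("human", "user") and not q:
--             q = text
--         elif role in ("gpt", "assistant", "model") and q and not a:
--             a = text
--             break
--     return q, a
-- ===== SOURCE B (Python) =====
-- def extract_first_pair(convs):
--     """Extract first user->assistant pair: two scans instead of one stateful loop."""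
--     def role_of(msg):
--         return msg.get("from", msg.get("role", ""))
--
--     def text_of(msg):
--         return msg.get("value", msg.get("content", ""))
--
--     idx = next((i for i, m in enumerate(convs)
--                 if role_of(m) in ("human", "user") and text_of(m)), None)
--     if idx is None:
--         return "", ""
--     a = next((text_of(m) for m in convs[idx + 1:]
--               if role_of(m) in ("gpt", "assistant", "model")), "")
--     return text_of(convs[idx]), a
-- ===== Notes on version B (the rewrite author's own statement) =====
-- stated objective: simpler
-- what changed: Replaces A's single stateful loop with mutable q/a and a break by two declarative scans: first find the first user message with non-empty text, then find the first assistant message strictly after it.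
import Mathlib
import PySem

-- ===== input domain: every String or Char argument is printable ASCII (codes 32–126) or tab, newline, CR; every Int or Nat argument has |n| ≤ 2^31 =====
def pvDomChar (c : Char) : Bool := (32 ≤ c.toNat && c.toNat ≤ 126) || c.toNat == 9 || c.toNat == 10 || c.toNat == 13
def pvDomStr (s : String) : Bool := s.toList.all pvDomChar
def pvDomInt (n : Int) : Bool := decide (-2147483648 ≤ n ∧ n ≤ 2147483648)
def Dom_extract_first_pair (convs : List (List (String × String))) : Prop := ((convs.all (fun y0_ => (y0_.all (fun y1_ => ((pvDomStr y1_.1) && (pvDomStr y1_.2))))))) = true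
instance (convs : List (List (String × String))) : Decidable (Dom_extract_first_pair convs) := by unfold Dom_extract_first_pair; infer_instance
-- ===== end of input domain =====

-- B replaces A's single stateful loop (mutable q/a with a break) by two declarative scans; objective: simpler.

-- ===== PORT A =====
-- shared field extraction: msg.get(k1, msg.get(k2, "")) — first-match lookup on the association list
def pvRole (m : List (String × String)) : String :=
  (PySem.Dict.mk m).getD "from" ((PySem.Dict.mk m).getD "role" "")
def pvText (m : List (String × String)) : String :=
  (PySem.Dict.mk m).getD "value" ((PySem.Dict.mk m).getD "content" "")

-- A's for-loop with state q, a and early break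
def pvLoopA : List (List (String × String)) → String → String → String × String
  | [], q, a => (q, a)
  | m :: rest, q, a =>
    let role := pvRole m
    let text := pvText m
    if (role == "human" || role == "user") && (q == "") then pvLoopA rest text a
    else if (role == "gpt" || role == "assistant" || role == "model") && !(q == "") && (a == "") then (q, text)
    else pvLoopA rest q a

def extract_first_pair (convs : List (List (String × String))) : String × String :=
  pvLoopA convs "" ""

-- ===== PORT B =====
-- scan 1: first user message with non-empty text, returning its text and the remaining suffix
def pvFindQ : List (List (String × String)) → Option (String × List (List (String × String)))
  | [] => none
  | m :: rest =>
    if (pvRole m == "human" || pvRole m == "user") && !(pvText m == "") then some (pvText m, rest)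
    else pvFindQ rest

-- scan 2: first assistant message in the suffix
def pvFindA : List (List (String × String)) → String
  | [] => ""
  | m :: rest =>
    if pvRole m == "gpt" || pvRole m == "assistant" || pvRole m == "model" then pvText m
    else pvFindA rest

def extract_first_pair_alt (convs : List (List (String × String))) : String × String :=
  match pvFindQ convs with
  | none => ("", "")
  | some (q, rest) => (q, pvFindA rest)

-- ===== PRECONDITION & SPEC =====
def Spec_extract_first_pair (convs : List (List (String × String))) (out : String × String) : Prop := out = extract_first_pair_alt convs
instance (convs : List (List (String × String))) (out : String × String) : Decidable (Spec_extract_first_pair convs out) := by unfold Spec_extract_first_pair; infer_instance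

-- ===== CLAIM (what is proved, stated in full; the proofs are below) =====
def Claim_equal_extract_first_pair : Prop := ∀ (convs : List (List (String × String))), Dom_extract_first_pair convs → Spec_extract_first_pair convs (extract_first_pair convs)

-- ===== LEMMAS AND PROOFS =====

-- once q is non-empty, A's loop ignores user messages and returns the first assistant text
theorem pvLoopA_phase2 (rest : List (List (String × String))) (q : String) (hq : ¬ (q = "")) :
    pvLoopA rest q "" = (q, pvFindA rest) := by
  induction rest with
  | nil => simp [pvLoopA, pvFindA]
  | cons m tl ih =>
    simp only [pvLoopA, pvFindA]
    have hqb : (q == "") = false := by simpa using hq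
    by_cases hA : (pvRole m == "gpt" || pvRole m == "assistant" || pvRole m == "model") = true
    · simp [hqb, hA]
    · simp [hqb, hA, ih]

theorem pvLoopA_eq_alt (convs : List (List (String × String))) :
    pvLoopA convs "" "" = extract_first_pair_alt convs := by
  induction convs with
  | nil => simp [pvLoopA, extract_first_pair_alt, pvFindQ]
  | cons m tl ih =>
    simp only [pvLoopA, extract_first_pair_alt, pvFindQ]
    by_cases hU : (pvRole m == "human" || pvRole m == "user") = true
    · by_cases ht : pvText m = ""
      · simp only [hU, ht]
        simpa [extract_first_pair_alt] using ih
      · have htb : (pvText m == "") = false := by simpa using ht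
        simp [hU, htb, pvLoopA_phase2 tl (pvText m) ht]
    · have hUb : (pvRole m == "human" || pvRole m == "user") = false := by simpa using hU
      simp only [hUb, Bool.false_and, Bool.and_false, Bool.not_true, BEq.rfl]
      simpa [extract_first_pair_alt] using ih

-- ===== VERDICT (by name: the statement is the Claim_ definition above) =====
theorem extract_first_pair_spec : Claim_equal_extract_first_pair := by
  intro convs _
  unfold Spec_extract_first_pair extract_first_pair
  exact pvLoopA_eq_alt convs
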